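-- pv_equiv track=rewrite | github.com/MoltoRubato/FOC_Project2 | P2Q1.py | get_colors_straightforward
-- ===== SOURCE A (Python) =====
-- BOTH_WHITE = 2
--
-- BOTH_BLACK = 0
--
-- ID = 0
--
-- COLOR = 1
--
-- def get_colors_straightforward(evidences):
--     '''Takes a list of evidences in tuples. Finds all gnomes with white and
--     black hats in same-color-pairs. Returns a tuple of two sorted lists of
--     gnome-IDs or None if there is a contradiction.'''
--     # We will store the gnome IDs in sets to avoid redundant information
--     white = set()
--     black = set()
--
--     # We will checks each evidence for same-color-pairs
--     # Then, we will group the gnome IDs by their colors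
--     for evidence in evidences:
--         if evidence[COLOR] == BOTH_BLACK:
--             for gnome_id in evidence[ID]:
--                 black.add(gnome_id)
--
--         if evidence[COLOR] == BOTH_WHITE:
--             for gnome_id in evidence[ID]:
--                 white.add(gnome_id)
--
--     # Contradiction will occur if an ID is listed as both white and black
--     if white.intersection(black):
--         return None
--
--     # Outputs the grouped IDs in a tuple
--     return sorted(white), sorted(black)
-- ===== SOURCE B (Python) =====
-- BOTH_WHITE = 2
-- BOTH_BLACK = 0
--
-- def get_colors_straightforward(evidences):
--     # One dict mapping gnome id -> color, contradiction detected inline.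
--     color_of = {}
--     contradiction = False
--     for ids, color in evidences:
--         if color == BOTH_BLACK or color == BOTH_WHITE:
--             for gnome_id in ids:
--                 prev = color_of.get(gnome_id)
--                 if prev is not None and prev != color:
--                     contradiction = True
--                 color_of[gnome_id] = color
--     if contradiction:
--         return None
--     white = sorted(k for k, c in color_of.items() if c == BOTH_WHITE)
--     black = sorted(k for k, c in color_of.items() if c == BOTH_BLACK)
--     return white, black
-- ===== Notes on version B (the rewrite author's own statement) =====
-- stated objective: alternative
-- what changed: Replaces A's two color sets plus a final set-intersection contradiction test by a single gnome-id-to-color dict with the contradiction detected inline at insertion time, building the two sorted lists from the dict afterwards.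
import Mathlib
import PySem

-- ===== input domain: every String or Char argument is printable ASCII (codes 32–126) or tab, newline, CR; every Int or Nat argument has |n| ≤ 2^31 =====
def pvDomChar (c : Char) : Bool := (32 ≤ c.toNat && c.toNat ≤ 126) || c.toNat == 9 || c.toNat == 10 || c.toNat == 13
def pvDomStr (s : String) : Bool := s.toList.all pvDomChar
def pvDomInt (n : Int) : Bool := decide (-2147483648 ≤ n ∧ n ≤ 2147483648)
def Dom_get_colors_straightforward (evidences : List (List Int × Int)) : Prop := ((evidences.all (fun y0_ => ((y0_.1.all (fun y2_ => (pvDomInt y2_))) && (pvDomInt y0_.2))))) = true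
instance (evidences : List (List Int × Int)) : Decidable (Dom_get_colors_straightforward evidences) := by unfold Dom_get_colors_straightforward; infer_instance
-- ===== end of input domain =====

-- B replaces A's two color sets and final intersection test by one id→color dict with
-- inline contradiction detection (alternative decomposition, similar cost).

-- ===== PORT A =====
def get_colors_straightforward (evidences : List (List Int × Int)) : Option (List Int × List Int) :=
  let st := evidences.foldl (fun (st : PySem.Set Int × PySem.Set Int) evidence =>
    let st := if evidence.2 == 0 then
        (st.1, evidence.1.foldl (fun s g => PySem.Set.add s g) st.2) else st
    let st := if evidence.2 == 2 then
        (evidence.1.foldl (fun s g => PySem.Set.add s g) st.1, st.2) else st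
    st) (PySem.Set.empty, PySem.Set.empty)
  if PySem.Set.inter st.1 st.2 ≠ [] then none
  else some (PySem.List.sorted st.1 (fun x => x) false, PySem.List.sorted st.2 (fun x => x) false)

-- ===== PORT B =====
-- one evidence step of B's loop: assign each listed gnome its color, flagging a clash
def altStep (st : PySem.Dict Int Int × Bool) (ev : List Int × Int) : PySem.Dict Int Int × Bool :=
  if ev.2 == 0 || ev.2 == 2 then
    ev.1.foldl (fun st g =>
      let prev := st.1.get? g
      (st.1.insert g ev.2,
       st.2 || (match prev with | some p => p != ev.2 | none => false))) st
  else st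

def get_colors_straightforward_alt (evidences : List (List Int × Int)) : Option (List Int × List Int) :=
  let st := evidences.foldl altStep (PySem.Dict.empty, false)
  if st.2 then none
  else some
    (PySem.List.sorted (((PySem.Dict.items st.1).filter (fun kv => kv.2 == 2)).map (fun kv => kv.1)) (fun x => x) false,
     PySem.List.sorted (((PySem.Dict.items st.1).filter (fun kv => kv.2 == 0)).map (fun kv => kv.1)) (fun x => x) false)

-- ===== PRECONDITION & SPEC =====
def Spec_get_colors_straightforward (evidences : List (List Int × Int)) (out : Option (List Int × List Int)) : Prop := out = get_colors_straightforward_alt evidences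
instance (evidences : List (List Int × Int)) (out : Option (List Int × List Int)) : Decidable (Spec_get_colors_straightforward evidences out) := by unfold Spec_get_colors_straightforward; infer_instance

-- ===== CLAIM (what is proved, stated in full; the proofs are below) =====
def Claim_equal_get_colors_straightforward : Prop := ∀ (evidences : List (List Int × Int)), Dom_get_colors_straightforward evidences → Spec_get_colors_straightforward evidences (get_colors_straightforward evidences)

-- ===== LEMMAS AND PROOFS =====

-- Invariant tying A's loop state (white set, black set) to B's (dict, flag):
-- the flag is set iff some gnome is in both sets, and while it is unset the dict
-- maps a gnome to 2 / 0 exactly when it is in the white / black set.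
def pvInv (a : PySem.Set Int × PySem.Set Int) (b : PySem.Dict Int Int × Bool) : Prop :=
  a.1.Nodup ∧ a.2.Nodup ∧ (PySem.Dict.keys b.1).Nodup ∧
  (∀ g v, b.1.get? g = some v → v = 0 ∨ v = 2) ∧
  (b.2 = true ↔ ∃ g, g ∈ a.1 ∧ g ∈ a.2) ∧
  (b.2 = false → (∀ g, b.1.get? g = some 2 ↔ g ∈ a.1) ∧ (∀ g, b.1.get? g = some 0 ↔ g ∈ a.2))

lemma pvInv_step_white (g : Int) (W B : PySem.Set Int) (d : PySem.Dict Int Int) (f : Bool)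
    (h : pvInv (W, B) (d, f)) :
    pvInv (PySem.Set.add W g, B)
      (d.insert g 2, f || (match d.get? g with | some p => p != (2 : Int) | none => false)) := by
  obtain ⟨hW, hB, hK, hVals, hFlag, hF⟩ := h
  refine ⟨PySem.Set.nodup_add W g hW, hB, PySem.Dict.nodup_keys_insert d g 2 hK, ?_, ?_, ?_⟩
  · intro g' v hv
    rw [PySem.Dict.get?_insert] at hv
    split at hv
    · cases hv; right; rfl
    · exact hVals g' v hv
  · constructor
    · intro hf
      rcases Bool.or_eq_true_iff.mp hf with hf | hc
      · obtain ⟨g', h1, h2⟩ := hFlag.mp hf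
        exact ⟨g', (PySem.Set.mem_add _ _ _).mpr (Or.inl h1), h2⟩
      · -- cond true: d.get? g = some p, p ≠ 2, hence p = 0, hence (if f was false) g ∈ B
        rcases hget : d.get? g with _ | p
        · rw [hget] at hc; simp at hc
        · rw [hget] at hc
          simp only [bne_iff_ne, ne_eq] at hc
          have hp0 : p = 0 := by rcases hVals g p hget with h0 | h2' <;> simp_all
          cases hf2 : f with
          | true =>
            obtain ⟨g', h1, h2⟩ := hFlag.mp hf2
            exact ⟨g', (PySem.Set.mem_add _ _ _).mpr (Or.inl h1), h2⟩
          | false =>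
            have hgB : g ∈ B := ((hF hf2).2 g).mp (by rw [hget, hp0])
            exact ⟨g, (PySem.Set.mem_add _ _ _).mpr (Or.inr rfl), hgB⟩
    · rintro ⟨g', h1, h2⟩
      rcases (PySem.Set.mem_add _ _ _).mp h1 with h1 | rfl
      · rw [Bool.or_eq_true]; exact Or.inl (hFlag.mpr ⟨g', h1, h2⟩)
      · cases hf2 : f with
        | true => simp
        | false =>
          have : d.get? g' = some 0 := ((hF hf2).2 g').mpr h2
          rw [this]
          simp
  · intro hf'
    have hf : f = false := by
      rcases Bool.or_eq_false_iff.mp hf' with ⟨h1, _⟩; exact h1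
    have hc : (match d.get? g with | some p => p != (2 : Int) | none => false) = false := by
      rcases Bool.or_eq_false_iff.mp hf' with ⟨_, h2⟩; exact h2
    obtain ⟨h2iff, h0iff⟩ := hF hf
    constructor
    · intro g'
      rw [PySem.Dict.get?_insert]
      by_cases hg : g' = g
      · subst hg; simp [PySem.Set.mem_add]
      · rw [if_neg hg, PySem.Set.mem_add]
        rw [h2iff g']
        constructor
        · exact Or.inl
        · rintro (h | rfl)
          · exact h
          · exact absurd rfl hg
    · intro g'
      rw [PySem.Dict.get?_insert]
      by_cases hg : g' = g
      · subst hg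
        rw [if_pos rfl]
        constructor
        · intro hcon; cases hcon
        · intro hgB
          exfalso
          have : d.get? g' = some 0 := (h0iff g').mpr hgB
          rw [this] at hc
          simp at hc
      · rw [if_neg hg]; exact h0iff g'

lemma pvInv_step_black (g : Int) (W B : PySem.Set Int) (d : PySem.Dict Int Int) (f : Bool)
    (h : pvInv (W, B) (d, f)) :
    pvInv (W, PySem.Set.add B g)
      (d.insert g 0, f || (match d.get? g with | some p => p != (0 : Int) | none => false)) := by
  obtain ⟨hW, hB, hK, hVals, hFlag, hF⟩ := h
  refine ⟨hW, PySem.Set.nodup_add B g hB, PySem.Dict.nodup_keys_insert d g 0 hK, ?_, ?_, ?_⟩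
  · intro g' v hv
    rw [PySem.Dict.get?_insert] at hv
    split at hv
    · cases hv; left; rfl
    · exact hVals g' v hv
  · constructor
    · intro hf
      rcases Bool.or_eq_true_iff.mp hf with hf | hc
      · obtain ⟨g', h1, h2⟩ := hFlag.mp hf
        exact ⟨g', h1, (PySem.Set.mem_add _ _ _).mpr (Or.inl h2)⟩
      · rcases hget : d.get? g with _ | p
        · rw [hget] at hc; simp at hc
        · rw [hget] at hc
          simp only [bne_iff_ne, ne_eq] at hc
          have hp2 : p = 2 := by rcases hVals g p hget with h0 | h2' <;> simp_all
          cases hf2 : f with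
          | true =>
            obtain ⟨g', h1, h2⟩ := hFlag.mp hf2
            exact ⟨g', h1, (PySem.Set.mem_add _ _ _).mpr (Or.inl h2)⟩
          | false =>
            have hgW : g ∈ W := ((hF hf2).1 g).mp (by rw [hget, hp2])
            exact ⟨g, hgW, (PySem.Set.mem_add _ _ _).mpr (Or.inr rfl)⟩
    · rintro ⟨g', h1, h2⟩
      rcases (PySem.Set.mem_add _ _ _).mp h2 with h2 | rfl
      · rw [Bool.or_eq_true]; exact Or.inl (hFlag.mpr ⟨g', h1, h2⟩)
      · cases hf2 : f with
        | true => simp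
        | false =>
          have : d.get? g' = some 2 := ((hF hf2).1 g').mpr h1
          rw [this]
          simp
  · intro hf'
    have hf : f = false := by
      rcases Bool.or_eq_false_iff.mp hf' with ⟨h1, _⟩; exact h1
    have hc : (match d.get? g with | some p => p != (0 : Int) | none => false) = false := by
      rcases Bool.or_eq_false_iff.mp hf' with ⟨_, h2⟩; exact h2
    obtain ⟨h2iff, h0iff⟩ := hF hf
    constructor
    · intro g'
      rw [PySem.Dict.get?_insert]
      by_cases hg : g' = g
      · subst hg
        rw [if_pos rfl]
        constructor
        · intro hcon; simp at hcon
        · intro hgW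
          exfalso
          have : d.get? g' = some 2 := (h2iff g').mpr hgW
          rw [this] at hc
          simp at hc
      · rw [if_neg hg]; exact h2iff g'
    · intro g'
      rw [PySem.Dict.get?_insert]
      by_cases hg : g' = g
      · subst hg; simp [PySem.Set.mem_add]
      · rw [if_neg hg, PySem.Set.mem_add]
        rw [h0iff g']
        constructor
        · exact Or.inl
        · rintro (h | rfl)
          · exact h
          · exact absurd rfl hg

lemma pvInv_fold_white (l : List Int) (W B : PySem.Set Int) (d : PySem.Dict Int Int) (f : Bool)
    (h : pvInv (W, B) (d, f)) :
    pvInv (l.foldl (fun s g => PySem.Set.add s g) W, B)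
      (l.foldl (fun (st : PySem.Dict Int Int × Bool) g =>
        (st.1.insert g 2, st.2 || (match st.1.get? g with | some p => p != (2 : Int) | none => false))) (d, f)) := by
  induction l generalizing W d f with
  | nil => exact h
  | cons g t ih => exact ih _ _ _ (pvInv_step_white g W B d f h)

lemma pvInv_fold_black (l : List Int) (W B : PySem.Set Int) (d : PySem.Dict Int Int) (f : Bool)
    (h : pvInv (W, B) (d, f)) :
    pvInv (W, l.foldl (fun s g => PySem.Set.add s g) B)
      (l.foldl (fun (st : PySem.Dict Int Int × Bool) g =>
        (st.1.insert g 0, st.2 || (match st.1.get? g with | some p => p != (0 : Int) | none => false))) (d, f)) := by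
  induction l generalizing B d f with
  | nil => exact h
  | cons g t ih => exact ih _ _ _ (pvInv_step_black g W B d f h)

lemma pvInv_step_ev (ev : List Int × Int) (W B : PySem.Set Int) (d : PySem.Dict Int Int) (f : Bool)
    (h : pvInv (W, B) (d, f)) :
    pvInv ((fun (st : PySem.Set Int × PySem.Set Int) (evidence : List Int × Int) =>
        let st := if evidence.2 == 0 then
            (st.1, evidence.1.foldl (fun s g => PySem.Set.add s g) st.2) else st
        let st := if evidence.2 == 2 then
            (evidence.1.foldl (fun s g => PySem.Set.add s g) st.1, st.2) else st
        st) (W, B) ev)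
      (altStep (d, f) ev) := by
  unfold altStep
  by_cases h0 : ev.2 = 0
  · simp only [h0]
    norm_num
    exact pvInv_fold_black ev.1 W B d f h
  · by_cases h2 : ev.2 = 2
    · simp only [h2]
      norm_num
      exact pvInv_fold_white ev.1 W B d f h
    · norm_num [h0, h2]
      exact h

lemma pvInv_fold (evidences : List (List Int × Int)) (W B : PySem.Set Int)
    (d : PySem.Dict Int Int) (f : Bool) (h : pvInv (W, B) (d, f)) :
    pvInv (evidences.foldl (fun (st : PySem.Set Int × PySem.Set Int) evidence =>
        let st := if evidence.2 == 0 then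
            (st.1, evidence.1.foldl (fun s g => PySem.Set.add s g) st.2) else st
        let st := if evidence.2 == 2 then
            (evidence.1.foldl (fun s g => PySem.Set.add s g) st.1, st.2) else st
        st) (W, B))
      (evidences.foldl altStep (d, f)) := by
  induction evidences generalizing W B d f with
  | nil => exact h
  | cons ev t ih =>
    simp only [List.foldl_cons]
    exact ih _ _ _ _ (pvInv_step_ev ev W B d f h)
lemma pv_filter_keys_perm (d : PySem.Dict Int Int) (hnd : (PySem.Dict.keys d).Nodup)
    (c : Int) (W : List Int) (hW : W.Nodup) (hmem : ∀ k, d.get? k = some c ↔ k ∈ W) :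
    (((PySem.Dict.items d).filter (fun kv => kv.2 == c)).map (fun kv => kv.1)).Perm W := by
  have hsub : (((PySem.Dict.items d).filter (fun kv => kv.2 == c)).map (fun kv => kv.1)).Sublist
      ((PySem.Dict.items d).map (fun kv => kv.1)) := List.Sublist.map _ List.filter_sublist
  have hnd' : (((PySem.Dict.items d).filter (fun kv => kv.2 == c)).map (fun kv => kv.1)).Nodup := by
    refine List.Sublist.nodup hsub ?_
    simpa [PySem.Dict.keys] using hnd
  refine (List.perm_ext_iff_of_nodup hnd' hW).mpr ?_
  intro k
  simp only [List.mem_map, List.mem_filter, beq_iff_eq]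
  constructor
  · rintro ⟨⟨k', v⟩, ⟨hm, hv⟩, rfl⟩
    have : d.get? k' = some v := PySem.Dict.get?_of_mem_items d hm hnd
    exact (hmem k').mp (by rw [this]; exact congrArg some hv)
  · intro hk
    have hg : d.get? k = some c := (hmem k).mpr hk
    exact ⟨(k, c), ⟨PySem.Dict.mem_items_of_get?_eq_some d hg, rfl⟩, rfl⟩

lemma pv_final (a : PySem.Set Int × PySem.Set Int) (b : PySem.Dict Int Int × Bool) (h : pvInv a b) :
    (if PySem.Set.inter a.1 a.2 ≠ [] then (none : Option (List Int × List Int))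
     else some (PySem.List.sorted a.1 (fun x => x) false, PySem.List.sorted a.2 (fun x => x) false)) =
    (if b.2 then none
     else some (PySem.List.sorted (((PySem.Dict.items b.1).filter (fun kv => kv.2 == 2)).map (fun kv => kv.1)) (fun x => x) false,
                PySem.List.sorted (((PySem.Dict.items b.1).filter (fun kv => kv.2 == 0)).map (fun kv => kv.1)) (fun x => x) false)) := by
  obtain ⟨hA1, hA2, hK, hVals, hFlag, hF⟩ := h
  cases hb : b.2 with
  | true =>
    obtain ⟨g, h1, h2⟩ := hFlag.mp hb
    have hmem : g ∈ PySem.Set.inter a.1 a.2 := (PySem.Set.mem_inter _ _ _).mpr ⟨h1, h2⟩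
    rw [if_pos (by intro hnil; rw [hnil] at hmem; cases hmem), if_pos rfl]
  | false =>
    obtain ⟨h2iff, h0iff⟩ := hF hb
    have hemp : ¬ (PySem.Set.inter a.1 a.2 ≠ []) := by
      intro hne
      obtain ⟨g, hg⟩ := List.exists_mem_of_ne_nil _ hne
      obtain ⟨hg1, hg2⟩ := (PySem.Set.mem_inter _ _ _).mp hg
      have e2 := (h2iff g).mpr hg1
      have e0 := (h0iff g).mpr hg2
      rw [e2] at e0
      simp at e0
    rw [if_neg hemp, if_neg (by simp)]
    have p2 := pv_filter_keys_perm b.1 hK 2 a.1 hA1 h2iff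
    have p0 := pv_filter_keys_perm b.1 hK 0 a.2 hA2 h0iff
    have e2 := (PySem.List.sorted_id_eq_sorted_id_iff_perm _ _).mpr p2
    have e0 := (PySem.List.sorted_id_eq_sorted_id_iff_perm _ _).mpr p0
    rw [e2, e0]

lemma pv_base : pvInv (PySem.Set.empty, PySem.Set.empty) (PySem.Dict.empty, false) := by
  refine ⟨List.nodup_nil, List.nodup_nil, ?_, ?_, ?_, ?_⟩
  · simp [PySem.Dict.keys, PySem.Dict.empty]
  · intro g v hv
    simp [PySem.Dict.get?_empty] at hv
  · simp [PySem.Set.empty]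
  · intro _
    constructor <;> intro g <;> simp [PySem.Dict.get?_empty, PySem.Set.empty]

-- ===== VERDICT (by name: the statement is the Claim_ definition above) =====
theorem get_colors_straightforward_spec : Claim_equal_get_colors_straightforward := by
  intro evidences _
  unfold Spec_get_colors_straightforward get_colors_straightforward get_colors_straightforward_alt
  exact pv_final _ _ (pvInv_fold evidences PySem.Set.empty PySem.Set.empty PySem.Dict.empty false pv_base)
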